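-- pv_equiv track=rewrite | github.com/debbie-drg/advent-of-code-2015 | Day24/day24.py | is_group_valid
-- ===== SOURCE A (Python) =====
-- def is_group_valid(
--     remaining_packages: list[int],
--     value_to_match: int,
--     total_value: int,
--     number_groups: int,
-- ):
--     if value_to_match in remaining_packages:
--         if number_groups == 2:
--             return True
--         index = remaining_packages.index(value_to_match)
--         if is_group_valid(
--             remaining_packages[:index] + remaining_packages[index + 1 :],
--             total_value,
--             total_value,
--             number_groups - 1,
--         ):
--             return True
--     for index, package in enumerate(remaining_packages):
--         if value_to_match < package:
--             continue
--         if is_group_valid(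
--             remaining_packages[index + 1 :],
--             value_to_match - package,
--             total_value,
--             number_groups,
--         ):
--             return True
--     return False
-- ===== SOURCE B (Python) =====
-- def is_group_valid(
--     remaining_packages: list[int],
--     value_to_match: int,
--     total_value: int,
--     number_groups: int,
-- ):
--     # Iterative DFS over an explicit stack of (remaining, value, groups) states;
--     # total_value is invariant so it is not part of the state.
--     stack = [(remaining_packages, value_to_match, number_groups)]
--     while stack:
--         remaining, value, groups = stack.pop()
--         if value in remaining:
--             if groups == 2:
--                 return True
--             i = remaining.index(value)
--             stack.append((remaining[:i] + remaining[i + 1:], total_value, groups - 1))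
--         for i, package in enumerate(remaining):
--             if package <= value:
--                 stack.append((remaining[i + 1:], value - package, groups))
--     return False
-- ===== Notes on version B (the rewrite author's own statement) =====
-- stated objective: alternative
-- what changed: Replaced A's mutual recursion (recursive call per candidate inside a for-loop, plus a recursive group-closing call) by an iterative depth-first search over an explicit stack of (remaining, value_to_match, number_groups) states, dropping the invariant total_value from the state; success is tested once per popped state.
import Mathlib
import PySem

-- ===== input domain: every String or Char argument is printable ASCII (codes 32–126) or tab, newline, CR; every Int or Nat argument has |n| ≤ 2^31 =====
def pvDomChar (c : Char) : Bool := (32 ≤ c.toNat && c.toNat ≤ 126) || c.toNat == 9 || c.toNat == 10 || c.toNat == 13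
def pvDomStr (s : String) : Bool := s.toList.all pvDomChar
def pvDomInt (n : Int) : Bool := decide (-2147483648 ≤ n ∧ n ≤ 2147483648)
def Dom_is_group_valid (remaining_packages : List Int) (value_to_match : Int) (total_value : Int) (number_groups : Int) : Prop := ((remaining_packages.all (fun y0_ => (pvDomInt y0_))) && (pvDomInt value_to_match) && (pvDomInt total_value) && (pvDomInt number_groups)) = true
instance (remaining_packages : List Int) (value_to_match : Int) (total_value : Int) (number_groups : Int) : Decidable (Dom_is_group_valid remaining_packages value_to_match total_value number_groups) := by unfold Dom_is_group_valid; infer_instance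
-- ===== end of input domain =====

-- B replaces A's mutual recursion by an iterative DFS over an explicit stack of states; same result, similar cost (objective: alternative).

-- The removed list `r[:i] + r[i+1:]` (i = first index of v) has length r.length - 1.
-- (Cited by both ports' termination proofs, hence stated above them.)
theorem pvRemoved_len {r : List Int} {v : Int} (h : v ∈ r) :
    (PySem.List.slice r none (some (((PySem.List.index? r v).getD 0 : Nat) : Int)) ++
     PySem.List.slice r (some ((((PySem.List.index? r v).getD 0 : Nat) : Int) + 1)) none).length
      = r.length - 1 := by
  obtain ⟨k, hk⟩ := Option.isSome_iff_exists.1 ((PySem.List.index?_isSome_iff r v).2 h)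
  obtain ⟨pre, suf, hr, hlen, -⟩ := (PySem.List.index?_eq_some_iff r v k).1 hk
  have h1 : ((k : Int) + 1) = ((k + 1 : Nat) : Int) := by push_cast; ring
  rw [hk, Option.getD_some, h1, PySem.List.slice_to_natCast, PySem.List.slice_from_natCast]
  subst hr
  have ht : (pre ++ v :: suf).take k = pre := by rw [← hlen]; exact List.take_left
  have hd : (pre ++ v :: suf).drop (k + 1) = suf := by
    have h2 : pre ++ v :: suf = (pre ++ [v]) ++ suf := by simp
    rw [h2, ← hlen, show pre.length + 1 = (pre ++ [v]).length by simp]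
    exact List.drop_left
  rw [ht, hd]
  simp only [List.length_append, List.length_cons]
  omega

-- ===== PORT A =====
mutual
-- literal transliteration of A: membership test, g == 2 shortcut, first-occurrence removal, then the for-loop
def is_group_valid (remaining_packages : List Int) (value_to_match : Int) (total_value : Int) (number_groups : Int) : Bool :=
  (if h : value_to_match ∈ remaining_packages then
     if number_groups == 2 then true
     else
       let index : Nat := (PySem.List.index? remaining_packages value_to_match).getD 0
       is_group_valid
         (PySem.List.slice remaining_packages none (some (index : Int)) ++
          PySem.List.slice remaining_packages (some ((index : Int) + 1)) none)
         total_value total_value (number_groups - 1)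
   else false)
  || igvLoopA remaining_packages value_to_match total_value number_groups
termination_by 2 * remaining_packages.length + 1
decreasing_by
  · have h1 := pvRemoved_len h
    have h3 : 0 < remaining_packages.length := List.length_pos_iff.2 (List.ne_nil_of_mem h)
    omega
  · omega

-- the `for index, package in enumerate(remaining_packages)` loop, recursing on the suffix
def igvLoopA (packages : List Int) (value_to_match : Int) (total_value : Int) (number_groups : Int) : Bool :=
  match packages with
  | [] => false
  | p :: rest =>
    (if value_to_match < p then false
     else is_group_valid rest (value_to_match - p) total_value number_groups)
    || igvLoopA rest value_to_match total_value number_groups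
termination_by 2 * packages.length
decreasing_by
  · simp; omega
  · simp
end

-- ===== PORT B =====
-- children pushed by the loop over the popped state's packages (keep package ≤ value)
def igvLoopChildren (packages : List Int) (value_to_match : Int) (number_groups : Int) :
    List (List Int × Int × Int) :=
  match packages with
  | [] => []
  | p :: rest =>
    (if p ≤ value_to_match then [(rest, value_to_match - p, number_groups)] else [])
    ++ igvLoopChildren rest value_to_match number_groups

-- all children pushed for a popped state (first-occurrence-removal branch, then the loop branch)
def igvChildren (total_value : Int) (r : List Int) (v : Int) (g : Int) :
    List (List Int × Int × Int) :=
  (if v ∈ r then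
     let index : Nat := (PySem.List.index? r v).getD 0
     [(PySem.List.slice r none (some (index : Int)) ++
       PySem.List.slice r (some ((index : Int) + 1)) none, total_value, g - 1)]
   else [])
  ++ igvLoopChildren r v g

-- state weight 3^|remaining|; the children of a state always weigh strictly less (pvChildren_mu)
def pvMu (stack : List (List Int × Int × Int)) : Nat :=
  (stack.map (fun s => 3 ^ s.1.length)).sum

theorem pvMu_append (a b : List (List Int × Int × Int)) :
    pvMu (a ++ b) = pvMu a + pvMu b := by
  simp [pvMu]

theorem pvLoopChildren_mu (r : List Int) (v g : Int) :
    2 * pvMu (igvLoopChildren r v g) < 3 ^ r.length := by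
  induction r with
  | nil => simp [igvLoopChildren, pvMu]
  | cons p rest ih =>
    have hle : pvMu (igvLoopChildren (p :: rest) v g) ≤ 3 ^ rest.length + pvMu (igvLoopChildren rest v g) := by
      by_cases hp : p ≤ v <;> simp [igvLoopChildren, pvMu, hp]
    have h3 : (3:Nat) ^ (p :: rest).length = 3 * 3 ^ rest.length := by
      simp [pow_succ]; ring
    omega

theorem pvChildren_mu (t : Int) (r : List Int) (v g : Int) :
    pvMu (igvChildren t r v g) < 3 ^ r.length := by
  have hl := pvLoopChildren_mu r v g
  by_cases h : v ∈ r
  · have hr : r.length - 1 + 1 = r.length := by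
      have := List.length_pos_iff.2 (List.ne_nil_of_mem h)
      omega
    have heq : pvMu (igvChildren t r v g)
        = 3 ^ (r.length - 1) + pvMu (igvLoopChildren r v g) := by
      simp only [igvChildren, if_pos h, pvMu_append]
      congr 1
      simp only [pvMu, List.map_cons, List.map_nil, List.sum_cons, List.sum_nil, Nat.add_zero]
      rw [pvRemoved_len h]
    have h3 : (3:Nat) ^ r.length = 3 ^ (r.length - 1) * 3 := by
      conv_lhs => rw [← hr]
      rw [pow_succ]
    omega
  · have heq : pvMu (igvChildren t r v g) = pvMu (igvLoopChildren r v g) := by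
      simp [igvChildren, h]
    omega

-- the DFS driver: pop a state, test success, otherwise push its children
def igvRun (total_value : Int) (stack : List (List Int × Int × Int)) : Bool :=
  match stack with
  | [] => false
  | (r, v, g) :: rest =>
    if v ∈ r ∧ g == 2 then true
    else igvRun total_value (igvChildren total_value r v g ++ rest)
termination_by pvMu stack
decreasing_by
  have h1 := pvChildren_mu total_value r v g
  have hcons : pvMu ((r, v, g) :: rest) = 3 ^ r.length + pvMu rest := by
    simp [pvMu]
  rw [pvMu_append, hcons]
  omega

def is_group_valid_alt (remaining_packages : List Int) (value_to_match : Int) (total_value : Int) (number_groups : Int) : Bool :=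
  igvRun total_value [(remaining_packages, value_to_match, number_groups)]

-- ===== PRECONDITION & SPEC =====
def Spec_is_group_valid (remaining_packages : List Int) (value_to_match : Int) (total_value : Int) (number_groups : Int) (out : Bool) : Prop := out = is_group_valid_alt remaining_packages value_to_match total_value number_groups
instance (remaining_packages : List Int) (value_to_match : Int) (total_value : Int) (number_groups : Int) (out : Bool) : Decidable (Spec_is_group_valid remaining_packages value_to_match total_value number_groups out) := by unfold Spec_is_group_valid; infer_instance

-- ===== CLAIM (what is proved, stated in full; the proofs are below) =====
def Claim_equal_is_group_valid : Prop := ∀ (remaining_packages : List Int) (value_to_match : Int) (total_value : Int) (number_groups : Int), Dom_is_group_valid remaining_packages value_to_match total_value number_groups → Spec_is_group_valid remaining_packages value_to_match total_value number_groups (is_group_valid remaining_packages value_to_match total_value number_groups)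

-- ===== LEMMAS AND PROOFS =====

-- A's inner loop is the any-fold of B's loop children
theorem pvLoop_eq_children (r : List Int) (v t g : Int) :
    igvLoopA r v t g
      = (igvLoopChildren r v g).any (fun s => is_group_valid s.1 s.2.1 t s.2.2) := by
  induction r with
  | nil => rw [igvLoopA]; simp [igvLoopChildren]
  | cons p rest ih =>
    rw [igvLoopA]
    by_cases hp : v < p
    · have hp' : ¬ p ≤ v := by omega
      simp [igvLoopChildren, hp, hp', ih]
    · have hp' : p ≤ v := by omega
      simp [igvLoopChildren, hp, hp', ih]

-- one unfolding of A as success-test plus any over B's children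
theorem pvA_unfold (r : List Int) (v t g : Int) :
    is_group_valid r v t g
      = ((decide (v ∈ r) && (g == 2))
         || (igvChildren t r v g).any (fun s => is_group_valid s.1 s.2.1 t s.2.2)) := by
  rw [is_group_valid, pvLoop_eq_children]
  by_cases h : v ∈ r
  · by_cases hg : g = 2
    · simp [h, hg, igvChildren]
    · have hg' : (g == 2) = false := by simp [hg]
      simp [h, hg', igvChildren]
  · simp [h, igvChildren]

-- the DFS run returns true iff A accepts some state on the stack
theorem pvRun_eq_any (t : Int) (stack : List (List Int × Int × Int)) :
    igvRun t stack = stack.any (fun s => is_group_valid s.1 s.2.1 t s.2.2) := by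
  induction hn : pvMu stack using Nat.strong_induction_on generalizing stack with
  | _ n ih =>
  match stack with
  | [] => simp [igvRun]
  | (r, v, g) :: rest =>
    rw [igvRun]
    by_cases hs : v ∈ r ∧ g == 2
    · have hA : is_group_valid r v t g = true := by
        rw [pvA_unfold]
        simp [hs.1, hs.2]
      simp [hs, hA]
    · have hlt : pvMu (igvChildren t r v g ++ rest) < n := by
        have h1 := pvChildren_mu t r v g
        have hcons : pvMu ((r, v, g) :: rest) = 3 ^ r.length + pvMu rest := by
          simp [pvMu]
        rw [← hn, hcons, pvMu_append]
        omega
      rw [if_neg hs, ih _ hlt _ rfl]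
      simp only [List.any_append, List.any_cons]
      rw [pvA_unfold (t := t)]
      by_cases h : v ∈ r
      · have hg : (g == 2) = false := by
          by_contra hc
          exact hs ⟨h, by simpa using hc⟩
        simp [h, hg]
      · simp [h]

-- ===== VERDICT (by name: the statement is the Claim_ definition above) =====
theorem is_group_valid_spec : Claim_equal_is_group_valid := by
  intro r v t g _
  unfold Spec_is_group_valid is_group_valid_alt
  rw [pvRun_eq_any]
  simp
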